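-- pv_equiv track=rewrite | github.com/NovaAI-innovation/Infinite-Agency | agency/domains/preferences/domain.py | _determine_operation_type
-- ===== SOURCE A (Python) =====
-- def _determine_operation_type(query: str) -> str:
--     """Determine what type of CRUD operation to perform based on the query"""
--     if any(word in query for word in ["create", "add", "set", "configure", "enable"]):
--         return "create_preference"
--     elif any(word in query for word in ["get", "read", "fetch", "retrieve", "view", "show"]):
--         return "read_preference"
--     elif any(word in query for word in ["update", "modify", "change", "adjust", "edit"]):
--         return "update_preference"
--     elif any(word in query for word in ["delete", "remove", "clear", "reset", "disable"]):
--         return "delete_preference"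
--     elif any(word in query for word in ["list", "all", "get all", "show all"]):
--         return "list_preferences"
--     else:
--         return "read_preference"  # Default to read
-- ===== SOURCE B (Python) =====
-- RULES = [
--     (["create", "add", "set", "configure", "enable"], "create_preference"),
--     (["get", "read", "fetch", "retrieve", "view", "show"], "read_preference"),
--     (["update", "modify", "change", "adjust", "edit"], "update_preference"),
--     (["delete", "remove", "clear", "reset", "disable"], "delete_preference"),
--     (["list", "all", "get all", "show all"], "list_preferences"),
-- ]
--
-- # Flat keyword -> priority index map (keywords are pairwise distinct across groups).
-- KEYWORD_PRIORITY = {w: i for i, (words, _) in enumerate(RULES) for w in words}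
-- LABELS = [label for _, label in RULES]
--
--
-- def _determine_operation_type(query: str) -> str:
--     # One pass over all keywords: collect the priorities of every matched keyword,
--     # then the answer is the label of the MINIMUM matched priority (default: read).
--     matched = [prio for word, prio in KEYWORD_PRIORITY.items() if word in query]
--     return LABELS[min(matched)] if matched else "read_preference"
-- ===== Notes on version B (the rewrite author's own statement) =====
-- stated objective: alternative
-- what changed: Instead of an early-return if/elif ladder over five keyword groups, B builds a flat keyword-to-priority dict, collects in one pass the priorities of all matched keywords, and returns the label of the minimum matched priority.
import Mathlib
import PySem

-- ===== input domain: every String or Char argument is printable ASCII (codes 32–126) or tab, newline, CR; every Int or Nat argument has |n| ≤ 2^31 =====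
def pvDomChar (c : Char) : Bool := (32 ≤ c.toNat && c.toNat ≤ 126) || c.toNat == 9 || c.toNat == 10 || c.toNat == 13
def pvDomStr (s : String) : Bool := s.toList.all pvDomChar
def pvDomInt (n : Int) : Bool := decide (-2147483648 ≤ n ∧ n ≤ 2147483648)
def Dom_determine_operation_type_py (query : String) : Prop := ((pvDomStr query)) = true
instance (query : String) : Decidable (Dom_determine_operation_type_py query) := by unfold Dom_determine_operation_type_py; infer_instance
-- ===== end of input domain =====

-- B replaces A's early-return if/elif ladder by one pass over a flat keyword->priority map, returning the label of the minimum matched priority (same behaviour, different algorithm; no speed claim).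


-- ===== PORT A =====
-- Literal transliteration of A's if/elif ladder of `any` substring tests.
def determine_operation_type_py (query : String) : String :=
  if ["create", "add", "set", "configure", "enable"].any (fun w => PySem.Str.isIn w query) then
    "create_preference"
  else if ["get", "read", "fetch", "retrieve", "view", "show"].any (fun w => PySem.Str.isIn w query) then
    "read_preference"
  else if ["update", "modify", "change", "adjust", "edit"].any (fun w => PySem.Str.isIn w query) then
    "update_preference"
  else if ["delete", "remove", "clear", "reset", "disable"].any (fun w => PySem.Str.isIn w query) then
    "delete_preference"
  else if ["list", "all", "get all", "show all"].any (fun w => PySem.Str.isIn w query) then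
    "list_preferences"
  else
    "read_preference"

-- ===== PORT B =====
-- B's flat keyword -> priority dict, in insertion order (all keywords pairwise distinct).
def pvKeywordPrio : List (String × Nat) :=
  [("create", 0), ("add", 0), ("set", 0), ("configure", 0), ("enable", 0),
   ("get", 1), ("read", 1), ("fetch", 1), ("retrieve", 1), ("view", 1), ("show", 1),
   ("update", 2), ("modify", 2), ("change", 2), ("adjust", 2), ("edit", 2),
   ("delete", 3), ("remove", 3), ("clear", 3), ("reset", 3), ("disable", 3),
   ("list", 4), ("all", 4), ("get all", 4), ("show all", 4)]

def pvLabels : List String :=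
  ["create_preference", "read_preference", "update_preference", "delete_preference", "list_preferences"]

-- B: collect priorities of all matched keywords in one pass, answer = label of the minimum
-- (min(matched) is always < 5, so LABELS[min(matched)] is an in-range index in Source B; getD is exact there).
def determine_operation_type_py_alt (query : String) : String :=
  let matched := pvKeywordPrio.filterMap (fun wp => if PySem.Str.isIn wp.1 query then some wp.2 else none)
  match matched.min? with
  | some m => pvLabels.getD m "read_preference"
  | none => "read_preference"

-- ===== PRECONDITION & SPEC =====
def Spec_determine_operation_type_py (query : String) (out : String) : Prop := out = determine_operation_type_py_alt query
instance (query : String) (out : String) : Decidable (Spec_determine_operation_type_py query out) := by unfold Spec_determine_operation_type_py; infer_instance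

-- ===== CLAIM (what is proved, stated in full; the proofs are below) =====
def Claim_equal_determine_operation_type_py : Prop := ∀ (query : String), Dom_determine_operation_type_py query → Spec_determine_operation_type_py query (determine_operation_type_py query)

-- ===== LEMMAS AND PROOFS =====

-- foldl min returns any member that is also a lower bound.
theorem pv_foldl_min (xs : List Nat) (x a : Nat) (ha : a = x ∨ a ∈ xs)
    (hx : a ≤ x) (hall : ∀ y ∈ xs, a ≤ y) : xs.foldl min x = a := by
  induction xs generalizing x with
  | nil => simpa using (ha.resolve_right (by simp)).symm
  | cons y ys ih =>
    have hy : a ≤ y := hall y (by simp)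
    have hall' : ∀ z ∈ ys, a ≤ z := fun z hz => hall z (List.mem_cons_of_mem y hz)
    simp only [List.foldl_cons]
    rcases ha with h | h
    · exact ih (min x y) (Or.inl (by omega)) (by omega) hall'
    · rcases List.mem_cons.mp h with h | h
      · exact ih (min x y) (Or.inl (by omega)) (by omega) hall'
      · exact ih (min x y) (Or.inr h) (by omega) hall'

-- min? of a Nat list equals `some a` as soon as a is a member and a lower bound.
theorem pv_min?_eq_some (l : List Nat) (a : Nat) (ha : a ∈ l) (hall : ∀ x ∈ l, a ≤ x) :
    l.min? = some a := by
  cases l with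
  | nil => cases ha
  | cons x xs =>
    simp only [List.min?]
    exact congrArg some (pv_foldl_min xs x a (by simpa using ha)
      (hall x (by simp)) (fun y hy => hall y (by simp [hy])))

-- filterMap of the keyword dict distributes over a constant-priority block.
theorem pv_fm_map (query : String) (i : Nat) (l : List String) (rest : List (String × Nat)) :
    (l.map (fun w => (w, i)) ++ rest).filterMap
        (fun wp => if PySem.Str.isIn wp.1 query then some wp.2 else none)
    = (l.filter (fun w => PySem.Str.isIn w query)).map (fun _ => i)
      ++ rest.filterMap (fun wp => if PySem.Str.isIn wp.1 query then some wp.2 else none) := by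
  induction l with
  | nil => simp
  | cons w ws ih =>
    simp only [List.map_cons, List.cons_append, List.filterMap_cons, List.filter_cons]
    by_cases h : PySem.Str.isIn w query = true
    · rw [if_pos h, if_pos h]
      simp only [ih, List.map_cons, List.cons_append]
    · rw [if_neg h, if_neg h]
      exact ih

-- the matched-priority list splits into five constant blocks, one per keyword group.
theorem pv_blocks (query : String) :
    pvKeywordPrio.filterMap (fun wp => if PySem.Str.isIn wp.1 query then some wp.2 else none)
    = (["create", "add", "set", "configure", "enable"].filter (fun w => PySem.Str.isIn w query)).map (fun _ => (0 : Nat))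
      ++ ((["get", "read", "fetch", "retrieve", "view", "show"].filter (fun w => PySem.Str.isIn w query)).map (fun _ => 1)
      ++ ((["update", "modify", "change", "adjust", "edit"].filter (fun w => PySem.Str.isIn w query)).map (fun _ => 2)
      ++ ((["delete", "remove", "clear", "reset", "disable"].filter (fun w => PySem.Str.isIn w query)).map (fun _ => 3)
      ++ (["list", "all", "get all", "show all"].filter (fun w => PySem.Str.isIn w query)).map (fun _ => 4)))) := by
  have h : pvKeywordPrio
      = ["create", "add", "set", "configure", "enable"].map (fun w => (w, (0 : Nat)))
        ++ (["get", "read", "fetch", "retrieve", "view", "show"].map (fun w => (w, (1 : Nat)))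
        ++ (["update", "modify", "change", "adjust", "edit"].map (fun w => (w, (2 : Nat)))
        ++ (["delete", "remove", "clear", "reset", "disable"].map (fun w => (w, (3 : Nat)))
        ++ (["list", "all", "get all", "show all"].map (fun w => (w, (4 : Nat))) ++ [])))) := rfl
  rw [h, pv_fm_map, pv_fm_map, pv_fm_map, pv_fm_map, pv_fm_map]
  simp only [List.filterMap_nil, List.append_nil]

-- any = false makes a block empty
theorem pv_block_nil (query : String) (l : List String)
    (h : l.any (fun w => PySem.Str.isIn w query) = false) :
    l.filter (fun w => PySem.Str.isIn w query) = [] := by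
  rw [List.filter_eq_nil_iff]
  intro a ha
  simp only [List.any_eq_false] at h
  exact h a ha

-- any = true puts the block's priority into the matched list
theorem pv_block_mem (query : String) (l : List String) (i : Nat)
    (h : l.any (fun w => PySem.Str.isIn w query) = true) :
    i ∈ (l.filter (fun w => PySem.Str.isIn w query)).map (fun _ => i) := by
  rcases List.any_eq_true.mp h with ⟨w, hw, hp⟩
  exact List.mem_map.mpr ⟨w, List.mem_filter.mpr ⟨hw, hp⟩, rfl⟩

theorem pv_main (query : String) :
    determine_operation_type_py query = determine_operation_type_py_alt query := by
  simp only [determine_operation_type_py, determine_operation_type_py_alt, pv_blocks]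
  by_cases h0 : (["create", "add", "set", "configure", "enable"].any fun w => PySem.Str.isIn w query) = true
  · rw [pv_min?_eq_some _ 0 (List.mem_append_left _ (pv_block_mem query _ 0 h0)) (fun x _ => Nat.zero_le x),
      if_pos h0]
    rfl
  · have h0f : (["create", "add", "set", "configure", "enable"].any fun w => PySem.Str.isIn w query) = false := by
      simpa using h0
    rw [pv_block_nil query _ h0f, List.map_nil, List.nil_append]
    by_cases h1 : (["get", "read", "fetch", "retrieve", "view", "show"].any fun w => PySem.Str.isIn w query) = true
    · rw [pv_min?_eq_some _ 1 (List.mem_append_left _ (pv_block_mem query _ 1 h1))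
        (by intro x hx; simp only [List.mem_append, List.mem_map] at hx
            rcases hx with ⟨_, _, h⟩ | ⟨_, _, h⟩ | ⟨_, _, h⟩ | ⟨_, _, h⟩ <;> omega),
        if_neg h0, if_pos h1]
      rfl
    · have h1f : (["get", "read", "fetch", "retrieve", "view", "show"].any fun w => PySem.Str.isIn w query) = false := by
        simpa using h1
      rw [pv_block_nil query _ h1f, List.map_nil, List.nil_append]
      by_cases h2 : (["update", "modify", "change", "adjust", "edit"].any fun w => PySem.Str.isIn w query) = true
      · rw [pv_min?_eq_some _ 2 (List.mem_append_left _ (pv_block_mem query _ 2 h2))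
          (by intro x hx; simp only [List.mem_append, List.mem_map] at hx
              rcases hx with ⟨_, _, h⟩ | ⟨_, _, h⟩ | ⟨_, _, h⟩ <;> omega),
          if_neg h0, if_neg h1, if_pos h2]
        rfl
      · have h2f : (["update", "modify", "change", "adjust", "edit"].any fun w => PySem.Str.isIn w query) = false := by
          simpa using h2
        rw [pv_block_nil query _ h2f, List.map_nil, List.nil_append]
        by_cases h3 : (["delete", "remove", "clear", "reset", "disable"].any fun w => PySem.Str.isIn w query) = true
        · rw [pv_min?_eq_some _ 3 (List.mem_append_left _ (pv_block_mem query _ 3 h3))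
            (by intro x hx; simp only [List.mem_append, List.mem_map] at hx
                rcases hx with ⟨_, _, h⟩ | ⟨_, _, h⟩ <;> omega),
            if_neg h0, if_neg h1, if_neg h2, if_pos h3]
          rfl
        · have h3f : (["delete", "remove", "clear", "reset", "disable"].any fun w => PySem.Str.isIn w query) = false := by
            simpa using h3
          rw [pv_block_nil query _ h3f, List.map_nil, List.nil_append]
          by_cases h4 : (["list", "all", "get all", "show all"].any fun w => PySem.Str.isIn w query) = true
          · rw [pv_min?_eq_some _ 4 (pv_block_mem query _ 4 h4)
              (by intro x hx; simp only [List.mem_map] at hx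
                  rcases hx with ⟨_, _, h⟩; omega),
              if_neg h0, if_neg h1, if_neg h2, if_neg h3, if_pos h4]
            rfl
          · have h4f : (["list", "all", "get all", "show all"].any fun w => PySem.Str.isIn w query) = false := by
              simpa using h4
            rw [pv_block_nil query _ h4f, List.map_nil, List.min?_nil,
              if_neg h0, if_neg h1, if_neg h2, if_neg h3, if_neg h4]

-- ===== VERDICT (by name: the statement is the Claim_ definition above) =====
theorem determine_operation_type_py_spec : Claim_equal_determine_operation_type_py := by
  intro query _
  exact pv_main query
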